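-- pv_equiv track=rewrite | github.com/maurobio/libro | python/Libro.py | syllable_count
-- ===== SOURCE A (Python) =====
-- def syllable_count(word):
--     count = 0
--     vowels = 'aeiouy'
--     word = word.lower().strip(".:;?!")
--     if len(word) == 0:
--         count = 0
--         return count
--     if word[0] in vowels:
--         count +=1
--     for index in range(1,len(word)):
--         if word[index] in vowels and word[index-1] not in vowels:
--             count +=1
--     if word.endswith('e'):
--         count -= 1
--     if word.endswith('le'):
--         count+=1
--     if count == 0:
--         count +=1
--     return count
-- ===== SOURCE B (Python) =====
-- def syllable_count(word):
--     word = word.lower().strip(".:;?!")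
--     if not word:
--         return 0
--     v = 'aeiouy'
--     # identity: number of maximal vowel runs = (# vowels) - (# adjacent vowel-vowel pairs),
--     # since every vowel except the first of each run is preceded by a vowel.
--     count = sum(c in v for c in word) - sum(a in v and b in v for a, b in zip(word, word[1:]))
--     if word.endswith('e'):
--         count -= 1
--     if word.endswith('le'):
--         count += 1
--     if count == 0:
--         count = 1
--     return count
-- ===== Notes on version B (the rewrite author's own statement) =====
-- stated objective: alternative
-- what changed: Instead of A's positional scan for consonant-to-vowel boundaries, B computes the run count arithmetically as (total vowels) minus (adjacent vowel-vowel pairs, via zip of the word with its shift), using the identity that every vowel except the first of each run is preceded by a vowel; the ending adjustments are unchanged.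
import Mathlib
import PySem

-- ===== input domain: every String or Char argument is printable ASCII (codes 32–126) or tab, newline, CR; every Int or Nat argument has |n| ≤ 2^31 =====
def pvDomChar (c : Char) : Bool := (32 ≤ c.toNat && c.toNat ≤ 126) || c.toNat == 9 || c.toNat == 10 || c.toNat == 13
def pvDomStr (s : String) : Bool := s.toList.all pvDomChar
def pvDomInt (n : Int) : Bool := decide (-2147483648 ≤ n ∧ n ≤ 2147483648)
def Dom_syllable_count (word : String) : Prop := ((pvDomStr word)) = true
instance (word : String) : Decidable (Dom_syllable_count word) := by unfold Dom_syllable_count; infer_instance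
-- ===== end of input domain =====

-- B computes the vowel-run count arithmetically as (#vowels) - (#adjacent vowel-vowel pairs)
-- instead of A's scan for consonant-to-vowel boundaries; objective: alternative algorithm, same cost.

-- ===== PORT A =====
def syllable_count (word : String) : Int :=
  let vowels : List Char := ['a', 'e', 'i', 'o', 'u', 'y']
  let w := (PySem.Str.stripChars (PySem.Str.lower word) ".:;?!").toList
  if w.length = 0 then 0
  else
    let count : Int := if vowels.contains (PySem.List.pyGetD w 0 ' ') then 1 else 0
    let count := (PySem.List.pyRange 1 (w.length : Int)).foldl
      (fun count index =>
        if vowels.contains (PySem.List.pyGetD w index ' ')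
            && !vowels.contains (PySem.List.pyGetD w (index - 1) ' ')
        then count + 1 else count) count
    let count := if PySem.Chars.endswith w ['e'] then count - 1 else count
    let count := if PySem.Chars.endswith w ['l', 'e'] then count + 1 else count
    if count = 0 then count + 1 else count

-- ===== PORT B =====
-- helper for B: membership in the vowel string 'aeiouy'
def pvIsv (c : Char) : Bool := ['a', 'e', 'i', 'o', 'u', 'y'].contains c

def syllable_count_alt (word : String) : Int :=
  let w := (PySem.Str.stripChars (PySem.Str.lower word) ".:;?!").toList
  if w.isEmpty then 0
  else
    -- sum(c in v for c in word) - sum(a in v and b in v for a, b in zip(word, word[1:]))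
    let count : Int := (w.countP pvIsv : Int)
      - ((w.zip w.tail).countP (fun p => pvIsv p.1 && pvIsv p.2) : Int)
    let count := if PySem.Chars.endswith w ['e'] then count - 1 else count
    let count := if PySem.Chars.endswith w ['l', 'e'] then count + 1 else count
    if count = 0 then 1 else count

-- ===== PRECONDITION & SPEC =====
def Spec_syllable_count (word : String) (out : Int) : Prop := out = syllable_count_alt word
instance (word : String) (out : Int) : Decidable (Spec_syllable_count word out) := by unfold Spec_syllable_count; infer_instance

-- ===== CLAIM (what is proved, stated in full; the proofs are below) =====
def Claim_equal_syllable_count : Prop := ∀ (word : String), Dom_syllable_count word → Spec_syllable_count word (syllable_count word)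

-- ===== LEMMAS AND PROOFS =====

-- common abstraction: number of maximal vowel runs, given whether the previous char was a vowel
def pvRuns (prev : Bool) : List Char → Nat
  | [] => 0
  | c :: t => (if pvIsv c && !prev then 1 else 0) + pvRuns (pvIsv c) t

-- every vowel of t is either a run start (prev non-vowel) or adjacent to the vowel before it
theorem pv_runs_pairs (t : List Char) :
    ∀ (c : Char),
    pvRuns (pvIsv c) t + ((c :: t).zip t).countP (fun p => pvIsv p.1 && pvIsv p.2)
      = t.countP pvIsv := by
  induction t with
  | nil => intro c; simp [pvRuns]
  | cons d t' ih =>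
      intro c
      simp only [pvRuns, List.zip_cons_cons, List.countP_cons]
      have h := ih d
      by_cases hd : pvIsv d <;> by_cases hc : pvIsv c <;>
        simp [hd, hc] at h ⊢ <;> omega

-- B's pre-adjustment count equals the number of vowel runs
theorem pv_sub_eq_runs (c : Char) (t : List Char) :
    ((c :: t).countP pvIsv : Int)
      - (((c :: t).zip (c :: t).tail).countP (fun p => pvIsv p.1 && pvIsv p.2) : Int)
      = (pvRuns false (c :: t) : Int) := by
  have h := pv_runs_pairs t c
  have hcnt : (c :: t).countP pvIsv = (if pvIsv c then 1 else 0) + t.countP pvIsv := by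
    rw [List.countP_cons]; split_ifs <;> omega
  have hruns : pvRuns false (c :: t) = (if pvIsv c then 1 else 0) + pvRuns (pvIsv c) t := by
    simp only [pvRuns]; split_ifs with h1 h2 <;> simp_all
  simp only [List.tail_cons]
  omega

-- the index loop of A counts exactly the vowel runs of the tail, given the last char before it
theorem pv_countP_runs (t : List Char) :
    ∀ (ys : List Char) (d : Char),
    (PySem.List.pyRange ((ys.length : Int) + 1) ((ys.length : Int) + 1 + (t.length : Int))).countP
      (fun i =>
        pvIsv (PySem.List.pyGetD (ys ++ d :: t) i ' ')
          && !pvIsv (PySem.List.pyGetD (ys ++ d :: t) (i - 1) ' '))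
      = pvRuns (pvIsv d) t := by
  induction t with
  | nil =>
      intro ys d
      rw [PySem.List.pyRange_one_eq_nil (by simp)]
      simp [pvRuns]
  | cons c t ih =>
      intro ys d
      rw [PySem.List.pyRange_one_cons (by push_cast [List.length_cons]; omega)]
      rw [List.countP_cons]
      have h1 : PySem.List.pyGetD (ys ++ d :: c :: t) ((ys.length : Int) + 1) ' ' = c := by
        have hcast : ((ys.length : Int) + 1) = ((ys.length + 1 : Nat) : Int) := by push_cast; ring
        rw [hcast, PySem.List.pyGetD_natCast]
        rw [List.getD_eq_getElem?_getD, List.getElem?_append_right (by omega)]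
        simp
      have h0 : PySem.List.pyGetD (ys ++ d :: c :: t) ((ys.length : Int) + 1 - 1) ' ' = d := by
        have hcast : ((ys.length : Int) + 1 - 1) = ((ys.length : Nat) : Int) := by ring
        rw [hcast, PySem.List.pyGetD_natCast]
        rw [List.getD_eq_getElem?_getD, List.getElem?_append_right (by omega)]
        simp
      rw [h1, h0]
      have hys : ys ++ d :: c :: t = (ys ++ [d]) ++ c :: t := by simp
      have harith : (ys.length : Int) + 1 + 1 = (((ys ++ [d]).length : Int)) + 1 := by
        simp
      have harith2 : (ys.length : Int) + 1 + ((c :: t).length : Int)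
          = (((ys ++ [d]).length : Int)) + 1 + (t.length : Int) := by
        simp
        ring
      rw [hys, harith, harith2, ih (ys ++ [d]) c]
      simp only [pvRuns]
      split_ifs <;> omega

-- A's pre-adjustment count equals the number of vowel runs
theorem pv_count_eq (c : Char) (t : List Char) :
    ((PySem.List.pyRange 1 (((c :: t).length : Nat) : Int)).foldl
      (fun count index =>
        if ['a', 'e', 'i', 'o', 'u', 'y'].contains (PySem.List.pyGetD (c :: t) index ' ')
            && !(['a', 'e', 'i', 'o', 'u', 'y'].contains (PySem.List.pyGetD (c :: t) (index - 1) ' '))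
        then count + 1 else count)
      (if ['a', 'e', 'i', 'o', 'u', 'y'].contains (PySem.List.pyGetD (c :: t) 0 ' ') then (1 : Int) else 0))
      = (pvRuns false (c :: t) : Int) := by
  have hpv : ∀ x, ['a', 'e', 'i', 'o', 'u', 'y'].contains x = pvIsv x := fun _ => rfl
  simp only [hpv]
  rw [PySem.List.foldl_count_if]
  have hw : PySem.List.pyGetD (c :: t) 0 ' ' = c := PySem.List.pyGetD_zero_cons ..
  have hc := pv_countP_runs t [] c
  simp only [List.nil_append, List.length_nil, Nat.cast_zero, zero_add] at hc
  have hr : (1 : Int) + (t.length : Int) = (((c :: t).length : Nat) : Int) := by simp; ring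
  rw [hr] at hc
  rw [hw, hc]
  simp only [pvRuns]
  by_cases h : pvIsv c
  · simp [h]
  · simp [h]

-- ===== VERDICT (by name: the statement is the Claim_ definition above) =====
theorem syllable_count_spec : Claim_equal_syllable_count := by
  intro word _
  unfold Spec_syllable_count syllable_count syllable_count_alt
  simp only []
  cases hwe : (PySem.Str.stripChars (PySem.Str.lower word) ".:;?!").toList with
  | nil => simp
  | cons c t =>
      rw [if_neg (by simp : ¬(c :: t).length = 0),
          if_neg (by simp : ¬(c :: t).isEmpty = true)]
      rw [pv_sub_eq_runs c t]
      rw [pv_count_eq c t]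
      split_ifs <;> omega
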